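-- pv_equiv track=rewrite | github.com/Motlakhov/task_performance_lab | task1/task1.py | circular_path
-- ===== SOURCE A (Python) =====
-- def circular_path(n, m):
--
--     arr = list(range(1, n + 1))
--     result = []
--     start_idx = 0
--     current_pos = 0
--
--     while True:
--         result.append(arr[current_pos])
--         next_position = (current_pos + m - 1) % len(arr)
--
--         if next_position == start_idx:
--             break
--
--         current_pos = next_position
--
--     return ''.join(map(str, result))
-- ===== SOURCE B (Python) =====
-- def _gcd(a, b):
--     while b:
--         a, b = b, a % b
--     return a
--
--
-- def circular_path(n, m):
--     arr = list(range(1, n + 1))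
--     s = (m - 1) % n
--     count = n // _gcd(n, s)
--     return ''.join(str(arr[(k * s) % n]) for k in range(count))
-- ===== Notes on version B (the rewrite author's own statement) =====
-- stated objective: alternative
-- what changed: Replaces A's step-and-test simulation loop (walking positions until it returns to 0) by a closed-form orbit-length computation: count = n // gcd(n, (m-1)%n) and direct emission of arr[(k*s)%n] for k in range(count).
import Mathlib
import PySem

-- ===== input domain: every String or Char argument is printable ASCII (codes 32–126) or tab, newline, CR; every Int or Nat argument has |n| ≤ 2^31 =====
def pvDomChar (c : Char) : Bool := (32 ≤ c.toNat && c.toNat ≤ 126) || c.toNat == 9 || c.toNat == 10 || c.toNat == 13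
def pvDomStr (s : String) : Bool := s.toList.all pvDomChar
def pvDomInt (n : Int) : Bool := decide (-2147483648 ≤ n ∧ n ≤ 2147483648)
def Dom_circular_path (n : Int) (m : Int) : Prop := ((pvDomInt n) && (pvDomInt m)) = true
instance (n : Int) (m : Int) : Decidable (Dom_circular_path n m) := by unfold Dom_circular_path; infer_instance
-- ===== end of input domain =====

-- B replaces A's walk-until-back-at-start simulation loop by the closed-form orbit
-- length n // gcd(n, (m-1) % n) with direct indexed emission (objective: alternative algorithm).

-- ===== PORT A =====
-- the while-True loop; fuel only makes the recursion total (n.toNat+1 ≥ the iteration count on Pre_)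
def circLoop (arr : List Int) (m : Int) (pos : Int) (acc : List Int) : Nat → List Int
  | 0 => acc.reverse
  | fuel + 1 =>
    match PySem.List.pyGet? arr pos with
    | none => acc.reverse          -- Python raises IndexError here; excluded by Pre_
    | some v =>
      let next := PySem.Int.mod (pos + m - 1) (arr.length : Int)
      if next = 0 then (v :: acc).reverse
      else circLoop arr m next (v :: acc) fuel

def circular_path (n : Int) (m : Int) : String :=
  let arr := PySem.List.pyRange 1 (n + 1) 1
  PySem.Str.join "" ((circLoop arr m 0 [] (n.toNat + 1)).map PySem.Int.toStr)

-- ===== PORT B =====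
-- Euclid's algorithm from Source B; fuel only makes it total (b.toNat+1 suffices for 0 ≤ b)
def gcdE (a b : Int) : Nat → Int
  | 0 => a
  | fuel + 1 => if b = 0 then a else gcdE b (PySem.Int.mod a b) fuel

def circular_path_alt (n : Int) (m : Int) : String :=
  let arr := PySem.List.pyRange 1 (n + 1) 1
  let s := PySem.Int.mod (m - 1) n
  let count := PySem.Int.floordiv n (gcdE n s (s.toNat + 1))
  PySem.Str.join ""
    ((PySem.List.pyRange 0 count 1).map
      (fun k => PySem.Int.toStr (PySem.List.pyGetD arr (PySem.Int.mod (k * s) n) 0)))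

-- ===== PRECONDITION & SPEC =====
-- A raises (IndexError) for n ≤ 0 (arr is empty); Pre_ admits exactly the n on which A returns.
def Pre_circular_path (n : Int) (m : Int) : Prop := 1 ≤ n
instance (n : Int) (m : Int) : Decidable (Pre_circular_path n m) := by unfold Pre_circular_path; infer_instance
def pvWitness_circular_path : Int × Int := (5, 3)

def Spec_circular_path (n : Int) (m : Int) (out : String) : Prop := out = circular_path_alt n m
instance (n : Int) (m : Int) (out : String) : Decidable (Spec_circular_path n m out) := by unfold Spec_circular_path; infer_instance

-- ===== CLAIM (what is proved, stated in full; the proofs are below) =====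
def Claim_equal_circular_path : Prop := ∀ (n : Int) (m : Int), Dom_circular_path n m → Pre_circular_path n m → Spec_circular_path n m (circular_path n m)

-- ===== LEMMAS AND PROOFS =====

-- number theory: N ∣ k*S ↔ (N / gcd N S) ∣ k
theorem pv_dvd_mul_iff (N S k : Nat) (hN : 0 < N) :
    N ∣ k * S ↔ (N / Nat.gcd N S) ∣ k := by
  have hgpos : 0 < Nat.gcd N S := Nat.gcd_pos_of_pos_left _ hN
  set g := Nat.gcd N S with hg
  obtain ⟨N1, hN1⟩ : g ∣ N := Nat.gcd_dvd_left N S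
  obtain ⟨S1, hS1⟩ : g ∣ S := Nat.gcd_dvd_right N S
  have hNq : N / g = N1 := by rw [hN1]; exact Nat.mul_div_cancel_left _ hgpos
  have hSq : S / g = S1 := by rw [hS1]; exact Nat.mul_div_cancel_left _ hgpos
  have hcop : Nat.Coprime N1 S1 := by
    rw [← hNq, ← hSq, hg]; exact Nat.coprime_div_gcd_div_gcd hgpos
  rw [hNq]
  constructor
  · intro h
    rw [hN1, hS1] at h
    have h2 : g * N1 ∣ g * (k * S1) := by
      rwa [show g * (k * S1) = k * (g * S1) by ring]
    exact hcop.dvd_of_dvd_mul_right ((mul_dvd_mul_iff_left hgpos.ne').mp h2)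
  · rintro ⟨t, rfl⟩
    exact ⟨t * S1, by rw [hN1, hS1]; ring⟩

theorem pv_gcdE_eq (fuel : Nat) : ∀ (a b : Nat), b < fuel →
    gcdE (a : Int) (b : Int) fuel = (Nat.gcd a b : Int) := by
  induction fuel with
  | zero => intro a b h; omega
  | succ f ih =>
    intro a b h
    by_cases hb : b = 0
    · subst hb; simp [gcdE]
    · have hb' : (b : Int) ≠ 0 := by exact_mod_cast hb
      rw [gcdE, if_neg hb', PySem.Int.mod_natCast]
      rw [ih b (a % b) (by have := Nat.mod_lt a (y := b) (by omega); omega)]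
      rw [Nat.gcd_comm b, ← Nat.gcd_rec, Nat.gcd_comm b a]

-- the step lemma: one Python modulo step from position (j*S)%N lands on ((j+1)*S)%N
theorem pv_step (n m : Int) (j : Nat) (hn : 1 ≤ n) :
    PySem.Int.mod ((((j * ((m - 1).emod n).toNat) % n.toNat : Nat) : Int) + m - 1) n
      = ((((j + 1) * ((m - 1).emod n).toNat) % n.toNat : Nat) : Int) := by
  have hpos : (0 : Int) < n := hn
  have hs0 : 0 ≤ (m - 1).emod n := Int.emod_nonneg _ (by omega)
  have hsn : (((m - 1).emod n).toNat : Int) = (m - 1) % n := Int.toNat_of_nonneg hs0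
  have hNn : ((n.toNat : Int)) = n := Int.toNat_of_nonneg (by omega)
  rw [PySem.Int.mod_eq_emod_of_pos hpos, Int.natCast_mod, Int.natCast_mod, hNn]
  push_cast [hsn]
  have e1 : Int.ModEq n ((j : Int) * ((m - 1) % n) % n) ((j : Int) * ((m - 1) % n)) :=
    Int.emod_emod_of_dvd _ dvd_rfl
  have e2 : Int.ModEq n (m - 1) ((m - 1) % n) :=
    (Int.emod_emod_of_dvd _ dvd_rfl).symm
  have e3 := e1.add e2
  have e4 : (j : Int) * ((m - 1) % n) + (m - 1) % n = ((j : Int) + 1) * ((m - 1) % n) := by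
    ring
  have e5 : ((j : Int) * ((m - 1) % n) % n + m - 1) % n
      = ((j : Int) * ((m - 1) % n) % n + (m - 1)) % n := by ring_nf
  rw [e5, ← e4]
  exact e3

-- the loop invariant: from position (j*S)%N the loop emits values at positions j,…,c-1 of the orbit
theorem pv_loop (n m : Int) (hn : 1 ≤ n) :
    ∀ (fuel j : Nat) (acc : List Int),
      j < n.toNat / Nat.gcd n.toNat ((m - 1).emod n).toNat →
      n.toNat / Nat.gcd n.toNat ((m - 1).emod n).toNat - j ≤ fuel →
      circLoop (PySem.List.pyRange 1 (n + 1) 1) m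
          ((((j * ((m - 1).emod n).toNat) % n.toNat : Nat) : Int)) acc fuel
        = acc.reverse ++
          (List.range' j (n.toNat / Nat.gcd n.toNat ((m - 1).emod n).toNat - j)).map
            (fun t => 1 + (((t * ((m - 1).emod n).toNat) % n.toNat : Nat) : Int)) := by
  set S : Nat := ((m - 1).emod n).toNat with hS
  set N : Nat := n.toNat with hN
  set c : Nat := N / Nat.gcd N S with hc
  have hNpos : 0 < N := by omega
  have hcN : c ≤ N := Nat.div_le_self _ _
  have harrlen : (PySem.List.pyRange 1 (n + 1) 1).length = N := by
    rw [PySem.List.length_pyRange_one]; omega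
  intro fuel
  induction fuel with
  | zero => intro j acc hj hf; omega
  | succ f ih =>
    intro j acc hj hf
    have hidx : (j * S) % N < N := Nat.mod_lt _ hNpos
    have hget : PySem.List.pyGet? (PySem.List.pyRange 1 (n + 1) 1)
        ((((j * S) % N : Nat) : Int)) = some (1 + (((j * S) % N : Nat) : Int)) := by
      rw [PySem.List.pyGet?_natCast, List.getElem?_eq_getElem (by omega)]
      rw [PySem.List.getElem_pyRange_one]
    rw [circLoop, hget]
    simp only [harrlen]
    have hNn : ((N : Int)) = n := Int.toNat_of_nonneg (by omega)
    rw [hNn]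
    have hstep : PySem.Int.mod ((((j * S) % N : Nat) : Int) + m - 1) n
        = ((((j + 1) * S) % N : Nat) : Int) := pv_step n m j hn
    rw [hstep]
    -- break condition: ((j+1)*S)%N = 0 ↔ c ∣ (j+1) ↔ j+1 = c
    have hdvd : ((j + 1) * S) % N = 0 ↔ c ∣ (j + 1) := by
      have h1 : ((j + 1) * S) % N = 0 ↔ N ∣ (j + 1) * S := by omega
      rw [h1]
      exact pv_dvd_mul_iff N S (j + 1) hNpos
    by_cases hend : j + 1 = c
    · have hz : ((((j + 1) * S) % N : Nat) : Int) = 0 := by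
        have : ((j + 1) * S) % N = 0 := hdvd.mpr (hend ▸ dvd_refl c)
        simp [this]
      rw [if_pos hz]
      have : c - j = 1 := by omega
      rw [this]
      simp [List.range']
    · have hnz : ¬ ((((j + 1) * S) % N : Nat) : Int) = 0 := by
        intro h
        have h0 : ((j + 1) * S) % N = 0 := by exact_mod_cast h
        have := hdvd.mp h0
        have := Nat.le_of_dvd (by omega) this
        omega
      rw [if_neg hnz]
      have hj1 : j + 1 < c := by omega
      rw [ih (j + 1) ((1 + (((j * S) % N : Nat) : Int)) :: acc) hj1 (by omega)]
      have hsplit : List.range' j (c - j) =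
          j :: List.range' (j + 1) (c - (j + 1)) := by
        have : c - j = (c - (j + 1)) + 1 := by omega
        rw [this, List.range'_succ]
      rw [hsplit]
      simp

theorem circular_path_eq (n m : Int) (hn : 1 ≤ n) :
    circular_path n m = circular_path_alt n m := by
  simp only [circular_path, circular_path_alt]
  have hs0 : 0 ≤ (m - 1).emod n := Int.emod_nonneg _ (by omega)
  have hsltn : (m - 1).emod n < n := Int.emod_lt_of_pos _ (by omega)
  have hNpos : 0 < n.toNat := by omega
  have hgpos : 0 < Nat.gcd n.toNat ((m - 1).emod n).toNat :=
    Nat.gcd_pos_of_pos_left _ hNpos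
  have hgle : Nat.gcd n.toNat ((m - 1).emod n).toNat ≤ n.toNat :=
    Nat.le_of_dvd hNpos (Nat.gcd_dvd_left _ _)
  have hcpos : 0 < n.toNat / Nat.gcd n.toNat ((m - 1).emod n).toNat :=
    Nat.div_pos hgle hgpos
  have hcle : n.toNat / Nat.gcd n.toNat ((m - 1).emod n).toNat ≤ n.toNat :=
    Nat.div_le_self _ _
  have hNn : ((n.toNat : Nat) : Int) = n := Int.toNat_of_nonneg (by omega)
  have hsval : PySem.Int.mod (m - 1) n = ((((m - 1).emod n).toNat : Nat) : Int) := by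
    rw [PySem.Int.mod_eq_emod_of_pos (by omega), Int.toNat_of_nonneg hs0]
    rfl
  -- A side: the loop emits the whole orbit
  have hl := pv_loop n m hn (n.toNat + 1) 0 [] hcpos (by omega)
  rw [show ((0 * ((m - 1).emod n).toNat) % n.toNat : Nat) = 0 by simp] at hl
  rw [Nat.sub_zero, Nat.cast_zero] at hl
  simp only [List.reverse_nil, List.nil_append] at hl
  rw [hl, hsval, Int.toNat_natCast]
  -- B side: gcd, count, direct emission
  have hgcd : gcdE n ((((m - 1).emod n).toNat : Nat) : Int) (((m - 1).emod n).toNat + 1)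
      = ((Nat.gcd n.toNat ((m - 1).emod n).toNat : Nat) : Int) := by
    rw [← hNn]
    exact pv_gcdE_eq _ _ _ (by omega)
  rw [hgcd]
  have hcount : PySem.Int.floordiv n ((Nat.gcd n.toNat ((m - 1).emod n).toNat : Nat) : Int)
      = ((n.toNat / Nat.gcd n.toNat ((m - 1).emod n).toNat : Nat) : Int) := by
    rw [← hNn]
    exact PySem.Int.floordiv_natCast _ _
  rw [hcount, PySem.List.pyRange_zero_nat, List.map_map, List.map_map,
      List.range_eq_range']
  congr 1
  apply List.map_congr_left
  intro k hk
  have hkc : k < n.toNat / Nat.gcd n.toNat ((m - 1).emod n).toNat := by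
    rcases List.mem_range'.mp hk with ⟨i, hi, rfl⟩
    omega
  have hkidx : (k * ((m - 1).emod n).toNat) % n.toNat < n.toNat := Nat.mod_lt _ hNpos
  have hmod : PySem.Int.mod (((k : Nat) : Int) * ((((m - 1).emod n).toNat : Nat) : Int)) n
      = (((k * ((m - 1).emod n).toNat) % n.toNat : Nat) : Int) := by
    rw [← hNn, ← Int.natCast_mul]
    exact PySem.Int.mod_natCast _ _
  simp only [Function.comp, hmod, PySem.List.pyGetD_natCast]
  congr 1
  rw [List.getD_eq_getElem _ _ (by rw [PySem.List.length_pyRange_one]; omega),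
      PySem.List.getElem_pyRange_one]

-- ===== VERDICT (by name: the statement is the Claim_ definition above) =====
theorem circular_path_spec : Claim_equal_circular_path := by
  intro n m _ hpre
  unfold Spec_circular_path
  exact circular_path_eq n m hpre
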